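-- pv_equiv track=rewrite | github.com/FranklineMisango/hft-fpga-accelerator | fpga_simulation/python_sim/market_data_simulator.py | parse_fix_message
-- ===== SOURCE A (Python) =====
-- from typing import List, Dict, Optional
--
-- def parse_fix_message(message: str) -> Dict:
--     """Parse FIX message string"""
--     fields = {}
--     pairs = message.split('|')
--
--     for pair in pairs:
--         if '=' in pair:
--             tag, value = pair.split('=', 1)
--             fields[tag] = value
--
--     return fields
-- ===== SOURCE B (Python) =====
-- def parse_fix_message(message: str) -> dict:
--     """Parse FIX message string (single-pass character scan)"""
--     fields = {}
--     tag_buf = []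
--     val_buf = []
--     in_value = False
--     for ch in message:
--         if ch == '|':
--             if in_value:
--                 fields[''.join(tag_buf)] = ''.join(val_buf)
--             tag_buf = []
--             val_buf = []
--             in_value = False
--         elif ch == '=' and not in_value:
--             in_value = True
--         elif in_value:
--             val_buf.append(ch)
--         else:
--             tag_buf.append(ch)
--     if in_value:
--         fields[''.join(tag_buf)] = ''.join(val_buf)
--     return fields
-- ===== Notes on version B (the rewrite author's own statement) =====
-- stated objective: alternative
-- what changed: Replaced the pipe-split plus a per-pair equals-split loop by a single-pass character scanner that builds the tag and value buffers in place and flushes on each pipe separator and at end of string, never materialising the intermediate list of pairs.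
import Mathlib
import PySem

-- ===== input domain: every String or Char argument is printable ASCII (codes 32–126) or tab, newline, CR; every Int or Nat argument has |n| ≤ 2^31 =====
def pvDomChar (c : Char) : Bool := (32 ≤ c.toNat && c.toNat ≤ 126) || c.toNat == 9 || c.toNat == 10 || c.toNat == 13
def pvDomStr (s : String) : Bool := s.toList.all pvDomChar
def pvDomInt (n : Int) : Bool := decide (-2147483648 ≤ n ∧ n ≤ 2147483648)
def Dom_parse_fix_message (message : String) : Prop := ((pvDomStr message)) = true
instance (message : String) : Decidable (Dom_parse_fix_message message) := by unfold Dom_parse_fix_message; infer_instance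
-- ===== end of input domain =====

-- B replaces split('|') + per-pair split('=',1) by a single-pass character scanner with tag/value
-- buffers flushed at each '|' and at end of string; same O(n) cost, genuinely different traversal.

-- ===== PORT A =====
-- body of A's for-loop: if '=' in pair: tag, value = pair.split('=', 1); fields[tag] = value
def pvAbody (d : PySem.Dict String String) (pair : String) : PySem.Dict String String :=
  if PySem.Str.isIn "=" pair then
    match PySem.Str.splitMax? pair "=" 1 with
    | some (tag :: value :: _) => d.insert tag value
    | _ => d            -- unreachable: split('=',1) of a string containing '=' has two pieces
  else d

def parse_fix_message (message : String) : List (String × String) :=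
  match PySem.Str.split? message "|" with
  | none => []          -- unreachable: the separator "|" is non-empty
  | some pairs => (pairs.foldl pvAbody PySem.Dict.empty).items

-- ===== PORT B =====
-- the trailing flush of Source B: if in_value: fields[''.join(tag_buf)] = ''.join(val_buf)
def pvFlush (d : PySem.Dict String String) (tag value : List Char) (inv : Bool) :
    PySem.Dict String String :=
  if inv then d.insert (String.ofList tag) (String.ofList value) else d

-- one iteration of Source B's for-loop over the characters
def pvStep (st : PySem.Dict String String × List Char × List Char × Bool) (c : Char) :
    PySem.Dict String String × List Char × List Char × Bool :=
  match st with
  | (d, tag, value, inv) =>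
    if c = '|' then (pvFlush d tag value inv, [], [], false)
    else if c = '=' ∧ inv = false then (d, tag, value, true)
    else if inv then (d, tag, value ++ [c], true)
    else (d, tag ++ [c], value, false)

def parse_fix_message_alt (message : String) : List (String × String) :=
  match message.toList.foldl pvStep (PySem.Dict.empty, [], [], false) with
  | (d, tag, value, inv) => (pvFlush d tag value inv).items

-- ===== PRECONDITION & SPEC =====
def Spec_parse_fix_message (message : String) (out : List (String × String)) : Prop := out = parse_fix_message_alt message
instance (message : String) (out : List (String × String)) : Decidable (Spec_parse_fix_message message out) := by unfold Spec_parse_fix_message; infer_instance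

-- ===== CLAIM (what is proved, stated in full; the proofs are below) =====
def Claim_equal_parse_fix_message : Prop := ∀ (message : String), Dom_parse_fix_message message → Spec_parse_fix_message message (parse_fix_message message)

-- ===== LEMMAS AND PROOFS =====

-- apply f to the first element of a list (reference combinator for the split characterisations)
def pvMapFirst (f : List Char → List Char) : List (List Char) → List (List Char)
  | [] => []
  | p :: ps => f p :: ps

-- reference form of s.split('|')
def pvSp : List Char → List (List Char)
  | [] => [[]]
  | c :: rest => if c = '|' then [] :: pvSp rest else pvMapFirst (fun p => c :: p) (pvSp rest)

-- reference form of s.split('=', 1)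
def pvSp1 : List Char → List (List Char)
  | [] => [[]]
  | c :: rest => if c = '=' then [[], rest] else pvMapFirst (fun p => c :: p) (pvSp1 rest)

theorem pvMapFirst_id (l : List (List Char)) : pvMapFirst (fun p => p) l = l := by
  cases l <;> simp [pvMapFirst]

theorem pvGo_eq (fuel : Nat) : ∀ (l cur : List Char) (acc : List (List Char)),
    l.length < fuel →
    PySem.Chars.splitOn.go ['|'] fuel l cur acc
      = acc.reverse ++ pvMapFirst (fun p => cur.reverse ++ p) (pvSp l) := by
  induction fuel with
  | zero => intro l cur acc h; omega
  | succ f ih =>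
    intro l cur acc h
    cases l with
    | nil => simp [PySem.Chars.splitOn.go, pvSp, pvMapFirst]
    | cons c rest =>
      by_cases hc : c = '|'
      · subst hc
        have hp : List.isPrefixOf ['|'] ('|' :: rest) = true := by simp [List.isPrefixOf]
        simp only [PySem.Chars.splitOn.go, hp, if_pos]
        rw [show List.drop ['|'].length ('|' :: rest) = rest from rfl]
        rw [ih rest [] (cur.reverse :: acc) (by simpa using Nat.lt_of_succ_lt_succ h)]
        simp [pvSp, pvMapFirst]
        cases pvSp rest <;> rfl
      · have hpre : List.isPrefixOf ['|'] (c :: rest) = false := by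
          simp [List.isPrefixOf]; exact fun hx => absurd hx.symm hc
        simp only [PySem.Chars.splitOn.go, hpre]
        rw [ih rest (c :: cur) acc (by simpa using Nat.lt_of_succ_lt_succ h)]
        simp only [pvSp, if_neg hc]
        cases pvSp rest <;> simp [pvMapFirst]

theorem pvSplitOn_eq (l : List Char) : PySem.Chars.splitOn l ['|'] = pvSp l := by
  unfold PySem.Chars.splitOn
  rw [pvGo_eq (l.length + 1) l [] [] (by omega)]
  simp [pvMapFirst_id]

theorem pvGoMax0 (fuel : Nat) (l cur : List Char) (acc : List (List Char)) :
    PySem.Chars.splitOnMax.go ['='] fuel 0 l cur acc = ((cur.reverse ++ l) :: acc).reverse := by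
  cases fuel with
  | zero => simp [PySem.Chars.splitOnMax.go]
  | succ f => cases l <;> simp [PySem.Chars.splitOnMax.go]

theorem pvGoMax1 (fuel : Nat) : ∀ (l cur : List Char) (acc : List (List Char)),
    l.length < fuel →
    PySem.Chars.splitOnMax.go ['='] fuel 1 l cur acc
      = acc.reverse ++ pvMapFirst (fun p => cur.reverse ++ p) (pvSp1 l) := by
  induction fuel with
  | zero => intro l cur acc h; omega
  | succ f ih =>
    intro l cur acc h
    cases l with
    | nil => simp [PySem.Chars.splitOnMax.go, pvSp1, pvMapFirst]
    | cons c rest =>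
      by_cases hc : c = '='
      · subst hc
        have hp : List.isPrefixOf ['='] ('=' :: rest) = true := by simp [List.isPrefixOf]
        simp only [PySem.Chars.splitOnMax.go, hp, if_pos]
        rw [show List.drop ['='].length ('=' :: rest) = rest from rfl]
        rw [pvGoMax0]
        simp [pvSp1, pvMapFirst]
      · have hpre : List.isPrefixOf ['='] (c :: rest) = false := by
          simp [List.isPrefixOf]; exact fun hx => absurd hx.symm hc
        simp only [PySem.Chars.splitOnMax.go, hpre]
        rw [ih rest (c :: cur) acc (by simpa using Nat.lt_of_succ_lt_succ h)]
        simp only [pvSp1, if_neg hc]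
        cases pvSp1 rest <;> simp [pvMapFirst]

theorem pvSplitOnMax_eq (l : List Char) : PySem.Chars.splitOnMax l ['='] 1 = pvSp1 l := by
  unfold PySem.Chars.splitOnMax
  rw [if_neg (by norm_num)]
  rw [show (1 : Int).toNat = 1 from rfl]
  rw [pvGoMax1 (l.length + 1) l [] [] (by omega)]
  simp [pvMapFirst_id]

theorem pvSp1_not_mem (l : List Char) (h : '=' ∉ l) : pvSp1 l = [l] := by
  induction l with
  | nil => simp [pvSp1]
  | cons c rest ih =>
    have hc : c ≠ '=' := by intro hx; exact h (by simp [hx])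
    have hr : '=' ∉ rest := fun hx => h (by simp [hx])
    simp [pvSp1, hc, ih hr, pvMapFirst]

theorem pvSp1_append (t v : List Char) (h : '=' ∉ t) : pvSp1 (t ++ '=' :: v) = [t, v] := by
  induction t with
  | nil => simp [pvSp1]
  | cons c rest ih =>
    have hc : c ≠ '=' := by intro hx; exact h (by simp [hx])
    have hr : '=' ∉ rest := fun hx => h (by simp [hx])
    simp [pvSp1, hc, ih hr, pvMapFirst]

theorem pvSp1_mem (l : List Char) (h : '=' ∈ l) : ∃ t v, pvSp1 l = [t, v] := by
  induction l with
  | nil => simp at h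
  | cons c rest ih =>
    by_cases hc : c = '='
    · exact ⟨[], rest, by simp [pvSp1, hc]⟩
    · have hr : '=' ∈ rest := by
        rcases List.mem_cons.mp h with h1 | h1
        · exact absurd h1.symm hc
        · exact h1
      obtain ⟨t, v, hv⟩ := ih hr
      exact ⟨c :: t, v, by simp [pvSp1, hc, hv, pvMapFirst]⟩

-- A's loop body on a '|'-free chunk, in reference form
def pvProcA (d : PySem.Dict String String) (chunk : List Char) : PySem.Dict String String :=
  match pvSp1 chunk with
  | [t, v] => d.insert (String.ofList t) (String.ofList v)
  | _ => d

theorem pvIsIn_pos (chunk : List Char) (h : '=' ∈ chunk) :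
    PySem.Str.isIn "=" (String.ofList chunk) = true := by
  rw [PySem.Str.isIn_iff_infix]
  obtain ⟨s, t, hst⟩ := List.append_of_mem h
  exact ⟨s, t, by simp [hst]⟩

theorem pvIsIn_neg (chunk : List Char) (h : '=' ∉ chunk) :
    PySem.Str.isIn "=" (String.ofList chunk) = false := by
  cases hb : PySem.Str.isIn "=" (String.ofList chunk) with
  | false => rfl
  | true =>
    exfalso
    have hinf := (PySem.Str.isIn_iff_infix _ _).mp hb
    have hinf' : ['='] <:+: chunk := by simpa using hinf
    exact h (hinf'.sublist.subset (by simp))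

theorem pvAbody_eq (d : PySem.Dict String String) (chunk : List Char) :
    pvAbody d (String.ofList chunk) = pvProcA d chunk := by
  unfold pvAbody pvProcA
  have hsm : PySem.Str.splitMax? (String.ofList chunk) "=" 1
      = some ((pvSp1 chunk).map String.ofList) := by
    unfold PySem.Str.splitMax? PySem.Chars.splitMax?
    rw [if_neg (by simp)]
    simp [pvSplitOnMax_eq]
  by_cases h : '=' ∈ chunk
  · obtain ⟨t, v, hv⟩ := pvSp1_mem chunk h
    rw [pvIsIn_pos chunk h, if_pos rfl, hsm, hv]
    simp
  · rw [pvIsIn_neg chunk h]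
    rw [pvSp1_not_mem chunk h]
    simp

theorem pvFoldMap (l : List (List Char)) (d : PySem.Dict String String) :
    (l.map String.ofList).foldl pvAbody d = l.foldl pvProcA d := by
  induction l generalizing d with
  | nil => simp
  | cons c rest ih => simp [pvAbody_eq, ih]

theorem pvScan (cs : List Char) : ∀ (d : PySem.Dict String String) (tag value : List Char)
    (inv : Bool), '=' ∉ tag → (inv = false → value = []) →
    (match cs.foldl pvStep (d, tag, value, inv) with
     | (d', t', v', i') => pvFlush d' t' v' i')
    = (pvMapFirst (fun p => tag ++ (if inv then '=' :: value else []) ++ p) (pvSp cs)).foldl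
        pvProcA d := by
  induction cs with
  | nil =>
    intro d tag value inv htag hval
    cases inv with
    | true =>
      simp only [List.foldl_nil, pvSp, pvMapFirst, List.foldl_cons]
      simp [pvFlush, pvProcA, pvSp1_append tag value htag]
    | false =>
      simp only [List.foldl_nil, pvSp, pvMapFirst, List.foldl_cons]
      simp [pvFlush, pvProcA, pvSp1_not_mem tag htag]
  | cons c cs ih =>
    intro d tag value inv htag hval
    by_cases hc : c = '|'
    · subst hc
      rw [List.foldl_cons]
      have hstep : pvStep (d, tag, value, inv) '|' = (pvFlush d tag value inv, [], [], false) := by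
        simp [pvStep]
      rw [hstep, ih (pvFlush d tag value inv) [] [] false (by simp) (fun _ => rfl)]
      have hfirst : pvProcA d (tag ++ (if inv then '=' :: value else []) ++ []) 
          = pvFlush d tag value inv := by
        cases inv with
        | true => simp [pvProcA, pvFlush, pvSp1_append tag value htag]
        | false => simp [pvProcA, pvFlush, pvSp1_not_mem tag htag]
      simp only [pvSp, if_pos]
      cases hsp : pvSp cs <;> simp_all [pvMapFirst]
    · by_cases he : c = '=' ∧ inv = false
      · obtain ⟨hce, hinv⟩ := he
        subst hce hinv
        have hv : value = [] := hval rfl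
        subst hv
        rw [List.foldl_cons]
        have hstep : pvStep (d, tag, [], false) '=' = (d, tag, [], true) := by
          simp [pvStep, hc]
        rw [hstep, ih d tag [] true htag (by simp)]
        simp only [pvSp, if_neg hc]
        cases pvSp cs <;> simp [pvMapFirst]
      · cases inv with
        | true =>
          rw [List.foldl_cons]
          have hstep : pvStep (d, tag, value, true) c = (d, tag, value ++ [c], true) := by
            simp [pvStep, hc]
          rw [hstep, ih d tag (value ++ [c]) true htag (by simp)]
          simp only [pvSp, if_neg hc]
          cases pvSp cs <;> simp [pvMapFirst]
        | false =>
          have hce : c ≠ '=' := fun hx => he ⟨hx, rfl⟩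
          have hv : value = [] := hval rfl
          subst hv
          rw [List.foldl_cons]
          have hstep : pvStep (d, tag, [], false) c = (d, tag ++ [c], [], false) := by
            simp [pvStep, hc, hce]
          rw [hstep, ih d (tag ++ [c]) [] false (by simp [htag]; exact fun hx => hce hx.symm)
            (fun _ => rfl)]
          simp only [pvSp, if_neg hc]
          cases pvSp cs <;> simp [pvMapFirst]

-- ===== VERDICT (by name: the statement is the Claim_ definition above) =====
theorem parse_fix_message_spec : Claim_equal_parse_fix_message := by
  unfold Claim_equal_parse_fix_message
  intro message _
  unfold Spec_parse_fix_message
  have hsplit : PySem.Str.split? message "|"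
      = some ((pvSp message.toList).map String.ofList) := by
    unfold PySem.Str.split? PySem.Chars.split?
    rw [if_neg (by simp)]
    simp [pvSplitOn_eq]
  have hA : parse_fix_message message
      = ((pvSp message.toList).foldl pvProcA PySem.Dict.empty).items := by
    unfold parse_fix_message
    rw [hsplit]
    show (((pvSp message.toList).map String.ofList).foldl pvAbody PySem.Dict.empty).items = _
    rw [pvFoldMap]
  have hBf : parse_fix_message_alt message
      = ((pvSp message.toList).foldl pvProcA PySem.Dict.empty).items := by
    unfold parse_fix_message_alt
    cases hst : message.toList.foldl pvStep (PySem.Dict.empty, [], [], false) with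
    | mk d rest =>
      obtain ⟨t', v', i'⟩ := rest
      have hB := pvScan message.toList PySem.Dict.empty [] [] false (by simp) (fun _ => rfl)
      rw [hst] at hB
      simp only [List.nil_append] at hB
      show (pvFlush d t' v' i').items = _
      rw [hB]
      cases pvSp message.toList <;> simp [pvMapFirst]
  rw [hA, hBf]
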